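-- pv_equiv track=rewrite | github.com/Sunghwan7330/algorithm_example | codility/08_Leader/EquiLeader/main_fail.py | solution
-- ===== SOURCE A (Python) =====
-- def solution(A):
--     dic = {}
--     front_dic = {}
--     arr_len = len(A)
--     arr_a = []
--     for i in range(arr_len):
--         if A[i] in dic:
--             dic[A[i]] += 1
--         else:
--             dic[A[i]] = 1
--
--         domin_cnt = (i+1) // 2
--         domin_val = -1
--         check_val = 0;
--         for key, value in dic.items():
--             if value > domin_cnt:
--                 domin_val = key
--                 break
--             check_val += value
--             if check_val > domin_cnt:
--                 break
--         arr_a.append(domin_val)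
--
--     dic = {}
--     answer = 0
--     for i in range(arr_len-1, 0, -1):
--         if A[i] in dic:
--             dic[A[i]] += 1
--         else:
--             dic[A[i]] = 1
--
--         domin_cnt = (arr_len - i) // 2
--         domin_val = -1
--         check_val = 0;
--         for key, value in dic.items():
--             if value > domin_cnt:
--                 domin_val = key
--                 break
--             check_val += value
--             if check_val > domin_cnt:
--                 break
--
--         if domin_val == -1:
--             continue
--         if arr_a[i-1] == domin_val:
--             answer += 1
--
--     return answer
-- ===== SOURCE B (Python) =====
-- def solution(A):
--     n = len(A)
--     # Boyer-Moore majority vote for the global leader candidate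
--     cand = None
--     cnt = 0
--     for x in A:
--         if cnt == 0:
--             cand, cnt = x, 1
--         elif x == cand:
--             cnt += 1
--         else:
--             cnt -= 1
--     if cand is None:
--         return 0
--     total = A.count(cand)
--     if total * 2 <= n:
--         return 0
--     answer = 0
--     left = 0
--     for p in range(1, n):
--         if A[p - 1] == cand:
--             left += 1
--         if left > p // 2 and (total - left) > (n - p) // 2:
--             answer += 1
--     return answer
-- ===== Notes on version B (the rewrite author's own statement) =====
-- stated objective: faster
-- what changed: A recomputes a prefix/suffix leader at every index by scanning a growing dict (O(n^2) worst case); B finds the single global leader once with Boyer-Moore voting and then counts EquiLeader splits in one prefix-count sweep (O(n)).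
-- intended difference: On arrays where some split has -1 as the leader of both halves (e.g. [-1,-1]), A returns a count that misses those splits because it uses -1 as its 'no leader' sentinel and skips them, while B counts them; B's value is the intended EquiLeader count. — e.g. on solution([-1, -1]): A returns 0, B returns 1
import Mathlib
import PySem

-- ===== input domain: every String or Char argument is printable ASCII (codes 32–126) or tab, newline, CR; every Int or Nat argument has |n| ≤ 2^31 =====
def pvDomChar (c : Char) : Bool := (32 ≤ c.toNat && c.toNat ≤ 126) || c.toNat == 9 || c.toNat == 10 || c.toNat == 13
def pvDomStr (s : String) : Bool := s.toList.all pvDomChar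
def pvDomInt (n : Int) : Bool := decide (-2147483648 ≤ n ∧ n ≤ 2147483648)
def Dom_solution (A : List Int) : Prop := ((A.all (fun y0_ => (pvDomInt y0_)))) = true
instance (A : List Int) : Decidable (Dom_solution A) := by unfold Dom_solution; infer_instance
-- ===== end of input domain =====

-- B replaces A's per-index dict re-scan (O(n^2)) by Boyer-Moore global-leader voting plus one
-- prefix-count sweep (O(n)); A and B differ exactly where -1 leads both halves of a split (D_ below).

-- ===== PORT A =====
-- inner 'for key, value in dic.items(): …' loop with its two breaks
def pvScan (items : List (Int × Int)) (dominCnt : Int) (checkVal : Int) : Int :=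
  match items with
  | [] => -1
  | (k, v) :: rest =>
    if v > dominCnt then k
    else if checkVal + v > dominCnt then -1
    else pvScan rest dominCnt (checkVal + v)

-- 'if A[i] in dic: dic[A[i]] += 1 else: dic[A[i]] = 1'
def pvBump (d : PySem.Dict Int Int) (x : Int) : PySem.Dict Int Int :=
  if d.contains x then d.insert x (d.getD x 0 + 1) else d.insert x 1

-- body of A's first loop (state: the dict and arr_a)
def aStep1 (A : List Int) (st : PySem.Dict Int Int × List Int) (i : Int) :
    PySem.Dict Int Int × List Int :=
  let dic := pvBump st.1 (PySem.List.pyGetD A i 0)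
  let dominCnt := PySem.Int.floordiv (i + 1) 2
  (dic, st.2 ++ [pvScan dic.items dominCnt 0])

-- body of A's second loop (state: the dict and answer)
def aStep2 (A arrA : List Int) (st : PySem.Dict Int Int × Int) (i : Int) :
    PySem.Dict Int Int × Int :=
  let dic := pvBump st.1 (PySem.List.pyGetD A i 0)
  let dominCnt := PySem.Int.floordiv ((A.length : Int) - i) 2
  let dominVal := pvScan dic.items dominCnt 0
  if dominVal = -1 then (dic, st.2)
  else if PySem.List.pyGetD arrA (i - 1) 0 = dominVal then (dic, st.2 + 1)
  else (dic, st.2)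

def solution (A : List Int) : Int :=
  let arrLen : Int := (A.length : Int)
  let st1 := (PySem.List.pyRange 0 arrLen 1).foldl (aStep1 A) (PySem.Dict.empty, [])
  ((PySem.List.pyRange (arrLen - 1) 0 (-1)).foldl (aStep2 A st1.2) (PySem.Dict.empty, 0)).2

-- ===== PORT B =====
-- Boyer-Moore voting step ('if cnt == 0: … elif x == cand: … else: …')
def bVote (st : Option Int × Int) (x : Int) : Option Int × Int :=
  if st.2 = 0 then (some x, 1)
  else if some x = st.1 then (st.1, st.2 + 1)
  else (st.1, st.2 - 1)

-- sweep step (state: left, answer)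
def bSweep (A : List Int) (cand total : Int) (st : Int × Int) (p : Int) : Int × Int :=
  let left := if PySem.List.pyGetD A (p - 1) 0 = cand then st.1 + 1 else st.1
  let ans :=
    if left > PySem.Int.floordiv p 2 ∧
        total - left > PySem.Int.floordiv ((A.length : Int) - p) 2 then st.2 + 1 else st.2
  (left, ans)

def solution_alt (A : List Int) : Int :=
  let n : Int := (A.length : Int)
  let bm := A.foldl bVote (none, 0)
  match bm.1 with
  | none => 0
  | some cand =>
    let total : Int := (A.count cand : Int)
    if total * 2 ≤ n then 0
    else ((PySem.List.pyRange 1 n 1).foldl (bSweep A cand total) (0, 0)).2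

-- ===== PRECONDITION & SPEC =====
-- On arrays where some split has -1 as the leader of both halves, A misses those splits (its -1
-- 'no leader' sentinel skips them) while B counts them; B's value is the intended EquiLeader count.
def D_solution (A : List Int) : Prop :=
  ∃ p ∈ List.range A.length, p ≠ 0 ∧
    p < 2 * (A.take p).count (-1) ∧ A.length - p < 2 * (A.drop p).count (-1)
instance (A : List Int) : Decidable (D_solution A) := by unfold D_solution; infer_instance

def Spec_solution (A : List Int) (out : Int) : Prop := ¬ D_solution A → out = solution_alt A
instance (A : List Int) (out : Int) : Decidable (Spec_solution A out) := by unfold Spec_solution; infer_instance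

def pvDiffWitness_solution : List Int := [-1, -1]
def pvDiffWitnessOut_solution : Int × Int := (0, 1)

-- ===== CLAIM (what is proved, stated in full; the proofs are below) =====
def Claim_unchanged_solution : Prop := ∀ (A : List Int), Dom_solution A → Spec_solution A (solution A)
def Claim_changed_solution : Prop := Dom_solution (pvDiffWitness_solution) ∧ D_solution (pvDiffWitness_solution) ∧ solution (pvDiffWitness_solution) = pvDiffWitnessOut_solution.1 ∧ solution_alt (pvDiffWitness_solution) = pvDiffWitnessOut_solution.2 ∧ pvDiffWitnessOut_solution.1 ≠ pvDiffWitnessOut_solution.2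
def Claim_exact_solution : Prop := ∀ (A : List Int), Dom_solution A → D_solution A → solution A ≠ solution_alt A

-- ===== LEMMAS AND PROOFS =====

-- l has x as (strict-majority) leader
def isLd (l : List Int) (x : Int) : Bool := decide (l.length < 2 * l.count x)
-- the leader of l, if any (find? is well defined: at most one value can be a leader)
def ldQ (l : List Int) : Option Int := l.find? (isLd l)
-- the leader with A's sentinel -1 for 'none'
def sentVal (l : List Int) : Int := (ldQ l).getD (-1)

-- split-p indicator as A counts it
def indA (A : List Int) (p : Nat) : Int :=
  if sentVal (A.drop p) ≠ -1 ∧ sentVal (A.take p) = sentVal (A.drop p) then 1 else 0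
-- split-p indicator as B counts it
def indB (A : List Int) (p : Nat) : Int :=
  if ldQ (A.take p) = ldQ (A.drop p) ∧ (ldQ (A.drop p)).isSome then 1 else 0

def refA (A : List Int) : Int := ((List.range (A.length - 1)).map (fun t => indA A (t + 1))).sum
def refB (A : List Int) : Int := ((List.range (A.length - 1)).map (fun t => indB A (t + 1))).sum

lemma count_add_count_le (l : List Int) {x y : Int} (hxy : x ≠ y) :
    l.count x + l.count y ≤ l.length := by
  induction l with
  | nil => simp
  | cons a t ih =>
    by_cases hx : a = x <;> by_cases hy : a = y <;>
      simp [hx, hy, hxy, Ne.symm hxy] <;> omega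

lemma leader_unique {l : List Int} {x y : Int}
    (hx : l.length < 2 * l.count x) (hy : l.length < 2 * l.count y) : x = y := by
  by_contra h
  have := count_add_count_le l h
  omega

lemma find?_eq_some_unique {α : Type} {p : α → Bool} {l : List α} {x : α}
    (hmem : x ∈ l) (hx : p x = true) (huniq : ∀ y ∈ l, p y = true → y = x) :
    l.find? p = some x := by
  induction l with
  | nil => simp at hmem
  | cons a t ih =>
    by_cases ha : p a = true
    · have hax : a = x := huniq a (List.mem_cons_self) ha
      simp [List.find?, hax, hx]
    · have hmem' : x ∈ t := by
        rcases List.mem_cons.mp hmem with h | h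
        · exact absurd (h ▸ ha) (by simp [hx])
        · exact h
      simp only [List.find?, ha]
      exact ih hmem' (fun y hy h => huniq y (List.mem_cons_of_mem _ hy) h)

lemma ldQ_eq_some_iff {l : List Int} {x : Int} :
    ldQ l = some x ↔ l.length < 2 * l.count x := by
  constructor
  · intro h
    have hx := List.find?_some h
    simpa [isLd] using hx
  · intro h
    have hcnt : 0 < l.count x := by omega
    have hmem : x ∈ l := List.count_pos_iff.mp hcnt
    exact find?_eq_some_unique hmem (by simpa [isLd]) (fun y hy hp => by
      exact leader_unique (by simpa [isLd] using hp) h)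

lemma pvScan_eq_find? (items : List (Int × Int)) (c s : Int)
    (hnn : ∀ p ∈ items, 0 ≤ p.2)
    (hsum : s + (items.map Prod.snd).sum ≤ 2 * c + 1) :
    pvScan items c s =
      match items.find? (fun p => decide (c < p.2)) with
      | some p => p.1
      | none => -1 := by
  induction items generalizing s with
  | nil => simp [pvScan]
  | cons hd rest ih =>
    obtain ⟨k, v⟩ := hd
    simp only [List.map_cons, List.sum_cons] at hsum
    have hv : 0 ≤ v := hnn (k, v) List.mem_cons_self
    have hrest : ∀ p ∈ rest, 0 ≤ p.2 := fun p hp => hnn p (List.mem_cons_of_mem _ hp)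
    by_cases h1 : c < v
    · simp [pvScan, h1]
    · by_cases h2 : c < s + v
      · have hnone : rest.find? (fun p => decide (c < p.2)) = none := by
          rw [List.find?_eq_none]
          intro q hq
          have hle : q.2 ≤ (rest.map Prod.snd).sum :=
            List.single_le_sum
              (fun y hy => by
                obtain ⟨q', hq', rfl⟩ := List.mem_map.mp hy
                exact hrest q' hq') _
              (List.mem_map_of_mem (f := Prod.snd) hq)
          simp only [decide_eq_true_eq]
          intro hc
          omega
        simp [pvScan, h1, if_pos h2, hnone]
      · have : pvScan ((k, v) :: rest) c s = pvScan rest c (s + v) := by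
          simp [pvScan, h1, h2]
        rw [this, ih _ hrest (by omega)]
        simp [h1]

lemma set_ofList_perm_dedup (m : List Int) : (PySem.Set.ofList m).Perm m.dedup := by
  refine List.perm_iff_count.mpr (fun a => ?_)
  by_cases ha : a ∈ m
  · rw [List.count_eq_one_of_mem (PySem.Set.nodup_ofList m) ((PySem.Set.mem_ofList m a).mpr ha),
      List.count_eq_one_of_mem m.nodup_dedup (List.mem_dedup.mpr ha)]
  · rw [List.count_eq_zero.mpr (fun h => ha ((PySem.Set.mem_ofList m a).mp h)),
      List.count_eq_zero.mpr (fun h => ha (List.mem_dedup.mp h))]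

lemma sum_counts (m : List Int) :
    ((PySem.Set.ofList m).map (fun k => (m.count k : Int))).sum = (m.length : Int) := by
  have h1 : ((PySem.Set.ofList m).map (fun k => m.count k)).sum = m.length := by
    rw [((set_ofList_perm_dedup m).map (fun k => m.count k)).sum_eq]
    exact List.sum_map_count_dedup_eq_length m
  calc ((PySem.Set.ofList m).map (fun k => (m.count k : Int))).sum
      = (((PySem.Set.ofList m).map (fun k => m.count k)).map (fun n : Nat => (n : Int))).sum := by
        rw [List.map_map]; rfl
    _ = (m.length : Int) := by rw [← h1]; exact (Nat.cast_list_sum _).symm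

lemma pvScan_counter {m l : List Int} (hperm : m.Perm l) :
    pvScan (PySem.Dict.counter m).items (PySem.Int.floordiv (l.length : Int) 2) 0 = sentVal l := by
  have hcval : PySem.Int.floordiv (l.length : Int) 2 = ((l.length / 2 : Nat) : Int) := by
    exact_mod_cast PySem.Int.floordiv_natCast l.length 2
  rw [hcval]
  set c : Int := ((l.length / 2 : Nat) : Int) with hc
  have hitems := PySem.Dict.items_counter m
  have hnn : ∀ p ∈ (PySem.Dict.counter m).items, 0 ≤ p.2 := by
    rw [hitems]
    intro p hp
    obtain ⟨k, _, rfl⟩ := List.mem_map.mp hp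
    exact Int.natCast_nonneg _
  have hsum : (0 : Int) + (((PySem.Dict.counter m).items).map Prod.snd).sum ≤ 2 * c + 1 := by
    rw [hitems, List.map_map]
    have : ((PySem.Set.ofList m).map (Prod.snd ∘ fun k => (k, (m.count k : Int)))).sum
        = (m.length : Int) := sum_counts m
    rw [this, hperm.length_eq, hc]
    have h2 : l.length ≤ 2 * (l.length / 2) + 1 := by omega
    rw [zero_add]
    exact_mod_cast h2
  rw [pvScan_eq_find? _ _ _ hnn hsum, hitems]
  have hfind : (((PySem.Set.ofList m).map (fun k => (k, (m.count k : Int)))).find?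
      (fun p => decide (c < p.2)))
      = ((PySem.Set.ofList m).find? (fun k => decide (c < (m.count k : Int)))).map
          (fun k => (k, (m.count k : Int))) := List.find?_map
  rw [hfind]
  rcases hldq : ldQ l with _ | x
  · have hnone : (PySem.Set.ofList m).find? (fun k => decide (c < (m.count k : Int))) = none := by
      rw [List.find?_eq_none]
      intro k _
      simp only [decide_eq_true_eq]
      intro hck
      rw [hperm.count_eq] at hck
      have : l.length < 2 * l.count k := by
        rw [hc] at hck
        have := Nat.cast_lt.mp hck
        omega
      rw [ldQ_eq_some_iff.mpr this] at hldq
      cases hldq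
    rw [hnone]
    simp [sentVal, hldq]
  · have hx : l.length < 2 * l.count x := ldQ_eq_some_iff.mp hldq
    have hsome : (PySem.Set.ofList m).find? (fun k => decide (c < (m.count k : Int))) = some x := by
      refine find?_eq_some_unique ?_ ?_ ?_
      · refine (PySem.Set.mem_ofList m x).mpr (hperm.mem_iff.mpr (List.count_pos_iff.mp ?_))
        omega
      · simp only [decide_eq_true_eq]
        rw [hperm.count_eq, hc]
        exact_mod_cast (by omega : l.length / 2 < l.count x)
      · intro y _ hy
        simp only [decide_eq_true_eq] at hy
        rw [hperm.count_eq, hc] at hy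
        have := Nat.cast_lt.mp hy
        exact leader_unique (by omega) hx
    rw [hsome]
    simp [sentVal, hldq]

lemma pvBump_eq (d : PySem.Dict Int Int) (x : Int) :
    pvBump d x = d.modify x 0 (· + 1) := by
  by_cases h : d.contains x
  · simp [pvBump, PySem.Dict.modify, h]
  · have hg : d.getD x 0 = 0 := PySem.Dict.getD_of_not_contains d 0 (by simpa using h)
    simp [pvBump, PySem.Dict.modify, h, hg]

lemma loop1_inv (A : List Int) (k : Nat) (hk : k ≤ A.length) :
    (List.map (fun t : Nat => (t : Int)) (List.range k)).foldl (aStep1 A) (PySem.Dict.empty, []) =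
      (PySem.Dict.counter (A.take k), (List.range k).map (fun t => sentVal (A.take (t + 1)))) := by
  induction k with
  | zero => rfl
  | succ k ih =>
    have hklt : k < A.length := hk
    rw [List.range_succ, List.map_append, List.foldl_append, ih (le_of_lt hklt)]
    simp only [List.map_cons, List.map_nil, List.foldl_cons, List.foldl_nil]
    have hxa : PySem.List.pyGetD A (k : Int) 0 = A[k] := by
      rw [PySem.List.pyGetD_natCast]
      exact List.getD_eq_getElem A 0 hklt
    have htake : A.take (k + 1) = A.take k ++ [A[k]] := List.take_succ_eq_append_getElem hklt
    have hdic : pvBump (PySem.Dict.counter (A.take k)) A[k] = PySem.Dict.counter (A.take (k + 1)) := by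
      rw [pvBump_eq, htake, PySem.Dict.counter_append_singleton]
    have hlen : (A.take (k + 1)).length = k + 1 := List.length_take_of_le (by omega)
    have hscan : pvScan (PySem.Dict.counter (A.take (k + 1))).items
        (PySem.Int.floordiv ((k : Int) + 1) 2) 0 = sentVal (A.take (k + 1)) := by
      have := pvScan_counter (List.Perm.refl (A.take (k + 1)))
      rw [hlen] at this
      convert this using 3
    simp only [aStep1, hxa, hdic, hscan]
    rw [List.map_append]
    rfl

-- [j, j-1, …, 1]
def ddown : Nat → List Nat
  | 0 => []
  | j + 1 => (j + 1) :: ddown j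

lemma pyRange_down (j : Nat) :
    PySem.List.pyRange (j : Int) 0 (-1) = List.map (fun t : Nat => (t : Int)) (ddown j) := by
  have h : PySem.List.pyRange (j : Int) 0 (-1) =
      List.map (fun k : Nat => (j : Int) - (k : Int)) (List.range j) := by
    unfold PySem.List.pyRange
    rcases Nat.eq_zero_or_pos j with rfl | hj
    · norm_num
    · have h0 : (0 : Int) < (j : Int) := by exact_mod_cast hj
      rw [if_neg (by norm_num), if_neg (by norm_num : ¬ (0:Int) < -1), if_pos h0]
      have hc : (((j : Int) - 0 + -(-1) - 1) / -(-1)).toNat = j := by norm_num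
      rw [hc]
      exact List.map_congr_left (fun k _ => by ring)
  rw [h]; clear h
  induction j with
  | zero => simp [ddown]
  | succ j ih =>
    rw [List.range_succ_eq_map]
    simp only [List.map_cons, List.map_map, ddown, List.cons.injEq]
    refine ⟨by push_cast; ring, ?_⟩
    rw [← ih]
    exact List.map_congr_left (fun k _ => by simp only [Function.comp_apply]; push_cast; ring)

lemma loop2_inv (A : List Int) (j : Nat) (hj : j < A.length) (ans : Int) :
    (List.map (fun t : Nat => (t : Int)) (ddown j)).foldl
        (aStep2 A ((List.range A.length).map (fun t => sentVal (A.take (t + 1)))))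
        (PySem.Dict.counter ((A.drop (j + 1)).reverse), ans) =
      (PySem.Dict.counter ((A.drop 1).reverse),
        ans + ((List.range j).map (fun t => indA A (t + 1))).sum) := by
  induction j generalizing ans with
  | zero => simp [ddown]
  | succ j ih =>
    have hjlt : j + 1 < A.length := hj
    simp only [ddown, List.map_cons, List.foldl_cons]
    have hxa : PySem.List.pyGetD A ((j + 1 : Nat) : Int) 0 = A[j + 1] := by
      rw [PySem.List.pyGetD_natCast]
      exact List.getD_eq_getElem A 0 hjlt
    have hdrop : A.drop (j + 1) = A[j + 1] :: A.drop (j + 2) := List.drop_eq_getElem_cons hjlt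
    have hdic : pvBump (PySem.Dict.counter ((A.drop (j + 2)).reverse)) A[j + 1]
        = PySem.Dict.counter ((A.drop (j + 1)).reverse) := by
      rw [pvBump_eq, hdrop, List.reverse_cons, PySem.Dict.counter_append_singleton]
    have hscan : pvScan (PySem.Dict.counter ((A.drop (j + 1)).reverse)).items
        (PySem.Int.floordiv ((A.length : Int) - ((j + 1 : Nat) : Int)) 2) 0
        = sentVal (A.drop (j + 1)) := by
      have := pvScan_counter (A.drop (j + 1)).reverse_perm
      rw [List.length_drop] at this
      convert this using 3
      have : (j + 1 : Nat) ≤ A.length := le_of_lt hjlt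
      push_cast [Nat.cast_sub this]
      ring
    have hlook : PySem.List.pyGetD
        ((List.range A.length).map (fun t => sentVal (A.take (t + 1)))) (((j + 1 : Nat) : Int) - 1) 0
        = sentVal (A.take (j + 1)) := by
      have h1 : (((j + 1 : Nat) : Int) - 1) = ((j : Nat) : Int) := by push_cast; ring
      rw [h1, PySem.List.pyGetD_natCast]
      exact PySem.List.getD_map_range _ _ _ _ (lt_trans (Nat.lt_succ_self j) hjlt)
    have hstep : aStep2 A ((List.range A.length).map (fun t => sentVal (A.take (t + 1))))
        (PySem.Dict.counter ((A.drop (j + 2)).reverse), ans) ((j + 1 : Nat) : Int)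
        = (PySem.Dict.counter ((A.drop (j + 1)).reverse), ans + indA A (j + 1)) := by
      simp only [aStep2, hxa, hdic, hscan, hlook]
      by_cases h1 : sentVal (A.drop (j + 1)) = -1
      · simp [h1, indA]
      · by_cases h2 : sentVal (A.take (j + 1)) = sentVal (A.drop (j + 1))
        · simp [h1, h2, indA]
        · simp [h1, h2, indA]
    rw [hstep, ih ((Nat.lt_of_succ_lt hjlt)) (ans + indA A (j + 1))]
    rw [List.range_succ, List.map_append, List.sum_append]
    simp only [List.map_cons, List.map_nil, List.sum_cons, List.sum_nil]
    congr 1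
    omega

lemma solution_eq_refA (A : List Int) : solution A = refA A := by
  cases hn : A.length with
  | zero =>
    have hA : A = [] := List.length_eq_zero_iff.mp hn
    subst hA; rfl
  | succ j =>
    have hj : j < A.length := by omega
    simp only [solution, refA]
    rw [PySem.List.pyRange_zero_natCast, loop1_inv A A.length le_rfl]
    have h1 : ((A.length : Int) - 1) = ((j : Nat) : Int) := by rw [hn]; push_cast; ring
    rw [h1, pyRange_down j]
    have hinit : (PySem.Dict.empty : PySem.Dict Int Int)
        = PySem.Dict.counter ((A.drop (j + 1)).reverse) := by
      rw [← hn, List.drop_length]; rfl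
    rw [hinit, loop2_inv A j hj 0, hn]
    simp

lemma bm_inv (l : List Int) : ∀ (done : List Int) (cand : Option Int) (cnt : Int),
    0 ≤ cnt →
    (∀ x : Int, 2 * ((done.count x : Int)) ≤
      (done.length : Int) - cnt + (if some x = cand then 2 * cnt else 0)) →
    0 ≤ (l.foldl bVote (cand, cnt)).2 ∧
      ∀ x : Int, 2 * (((done ++ l).count x : Int)) ≤
        ((done ++ l).length : Int) - (l.foldl bVote (cand, cnt)).2 +
          (if some x = (l.foldl bVote (cand, cnt)).1 then 2 * (l.foldl bVote (cand, cnt)).2 else 0) := by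
  induction l with
  | nil =>
    intro done cand cnt h0 hI
    simpa using ⟨h0, hI⟩
  | cons a t ih =>
    intro done cand cnt h0 hI
    have hassoc : done ++ a :: t = (done ++ [a]) ++ t := by simp
    rw [hassoc, List.foldl_cons]
    by_cases hz : cnt = 0
    · have hb : bVote (cand, cnt) a = (some a, 1) := by simp [bVote, hz]
      rw [hb]
      refine ih (done ++ [a]) (some a) 1 (by norm_num) ?_
      intro x
      have := hI x
      by_cases hx : x = a
      · subst hx
        simp only [List.count_append, List.length_append] at *
        simp
        push_cast at *
        omega
      · have hxa : ¬ (some x = some a) := by simp [hx]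
        simp only [List.count_append, List.length_append, if_neg hxa] at *
        simp [List.count_singleton]
        push_cast at *
        omega
    · by_cases hc : some a = cand
      · have hb : bVote (cand, cnt) a = (cand, cnt + 1) := by simp [bVote, hz, hc]
        rw [hb]
        refine ih (done ++ [a]) cand (cnt + 1) (by omega) ?_
        intro x
        have := hI x
        by_cases hx : some x = cand
        · have hxa : x = a := by rw [← hc] at hx; exact Option.some_inj.mp hx
          subst hxa
          simp only [List.count_append, List.length_append, if_pos hx] at *
          simp
          push_cast at *
          omega
        · have hxa : x ≠ a := by
            intro h; rw [h] at hx; exact hx hc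
          simp only [List.count_append, List.length_append, if_neg hx] at *
          simp [List.count_singleton]
          push_cast at *
          omega
      · have hb : bVote (cand, cnt) a = (cand, cnt - 1) := by simp [bVote, hz, hc]
        rw [hb]
        refine ih (done ++ [a]) cand (cnt - 1) (by omega) ?_
        intro x
        have := hI x
        by_cases hx : some x = cand
        · have hxa : x ≠ a := by
            intro h; rw [h] at hx; exact hc hx
          simp only [List.count_append, List.length_append, if_pos hx] at *
          simp [List.count_singleton]
          push_cast at *
          omega
        · by_cases hxa : x = a
          · subst hxa
            simp only [List.count_append, List.length_append, if_neg hx] at *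
            simp
            push_cast at *
            omega
          · simp only [List.count_append, List.length_append, if_neg hx] at *
            simp [List.count_singleton]
            push_cast at *
            omega

lemma bm_majority {A : List Int} {x : Int}
    (hx : (A.length : Int) < 2 * A.count x) :
    (A.foldl bVote (none, 0)).1 = some x := by
  have h := bm_inv A [] none 0 le_rfl (by intro y; simp)
  obtain ⟨h0, hI⟩ := h
  have := hI x
  simp only [List.nil_append] at this
  by_contra hne
  rw [if_neg (fun h => hne h.symm)] at this
  omega

lemma pyRange_one_up (n : Nat) :
    PySem.List.pyRange 1 (n : Int) 1 =
      List.map (fun t : Nat => ((t : Int) + 1)) (List.range (n - 1)) := by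
  rw [PySem.List.pyRange_of_pos 1 (n : Int) one_pos]
  rcases Nat.lt_or_ge 1 n with hn | hn
  · have h1 : (1 : Int) < (n : Int) := by exact_mod_cast hn
    rw [if_pos h1]
    have hc : (((n : Int) - 1 + 1 - 1) / 1).toNat = n - 1 := by
      simp only [add_sub_cancel_right, Int.ediv_one]
      omega
    rw [hc]
    exact List.map_congr_left (fun k _ => by ring)
  · have h1 : ¬ ((1 : Int) < (n : Int)) := by exact_mod_cast Nat.not_lt.mpr hn
    rw [if_neg h1]
    have : n - 1 = 0 := by omega
    rw [this]
    rfl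

lemma commonK {A : List Int} {p : Nat} {y : Int}
    (h1 : (A.take p).length < 2 * (A.take p).count y)
    (h2 : (A.drop p).length < 2 * (A.drop p).count y) :
    A.length < 2 * A.count y := by
  have hc : A.count y = (A.take p).count y + (A.drop p).count y := by
    conv_lhs => rw [← List.take_append_drop p A]
    exact List.count_append
  have hl : A.length = (A.take p).length + (A.drop p).length := by
    conv_lhs => rw [← List.take_append_drop p A]
    exact List.length_append
  omega

lemma indB_cond {A : List Int} {cand : Int} {p : Nat}
    (hp : p ≤ A.length) (hmaj : A.length < 2 * A.count cand) :
    (if ((((A.take p).count cand : Nat) : Int) > PySem.Int.floordiv ((p : Nat) : Int) 2 ∧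
        ((A.count cand : Nat) : Int) - (((A.take p).count cand : Nat) : Int) >
          PySem.Int.floordiv ((A.length : Int) - ((p : Nat) : Int)) 2)
      then (1 : Int) else 0) = indB A p := by
  have hlen1 : (A.take p).length = p := List.length_take_of_le hp
  have hlen2 : (A.drop p).length = A.length - p := List.length_drop
  have hsplit : A.count cand = (A.take p).count cand + (A.drop p).count cand := by
    conv_lhs => rw [← List.take_append_drop p A]
    exact List.count_append
  have hfd1 : PySem.Int.floordiv ((p : Nat) : Int) 2 = ((p / 2 : Nat) : Int) := by
    exact_mod_cast PySem.Int.floordiv_natCast p 2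
  have hfd2 : PySem.Int.floordiv ((A.length : Int) - ((p : Nat) : Int)) 2
      = (((A.length - p) / 2 : Nat) : Int) := by
    rw [← Nat.cast_sub hp]
    exact_mod_cast PySem.Int.floordiv_natCast (A.length - p) 2
  rw [hfd1, hfd2]
  have hiff : ((((A.take p).count cand : Nat) : Int) > ((p / 2 : Nat) : Int) ∧
      ((A.count cand : Nat) : Int) - (((A.take p).count cand : Nat) : Int) >
        (((A.length - p) / 2 : Nat) : Int)) ↔
      ((A.take p).length < 2 * (A.take p).count cand ∧
        (A.drop p).length < 2 * (A.drop p).count cand) := by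
    rw [hlen1, hlen2]
    constructor
    · rintro ⟨c1, c2⟩
      have c1' : p / 2 < (A.take p).count cand := by exact_mod_cast c1
      have c2' : (A.length - p) / 2 < A.count cand - (A.take p).count cand := by
        push_cast at c2
        omega
      omega
    · rintro ⟨c1, c2⟩
      constructor
      · exact_mod_cast (by omega : p / 2 < (A.take p).count cand)
      · push_cast
        omega
  by_cases hcond : ((A.take p).length < 2 * (A.take p).count cand ∧
      (A.drop p).length < 2 * (A.drop p).count cand)
  · rw [if_pos (hiff.mpr hcond)]
    unfold indB
    rw [ldQ_eq_some_iff.mpr hcond.1, ldQ_eq_some_iff.mpr hcond.2]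
    simp
  · rw [if_neg (fun h => hcond (hiff.mp h))]
    unfold indB
    rcases hq : ldQ (A.drop p) with _ | y
    · simp
    · have hy2 := ldQ_eq_some_iff.mp hq
      rcases hq1 : ldQ (A.take p) with _ | z
      · simp
      · have hz1 := ldQ_eq_some_iff.mp hq1
        by_cases hzy : z = y
        · subst hzy
          have hymaj : A.length < 2 * A.count z := commonK hz1 hy2
          have : z = cand := leader_unique hymaj hmaj
          subst this
          exact absurd ⟨hz1, hy2⟩ hcond
        · simp [hzy]

lemma ite_add_one {c : Prop} [Decidable c] (s : Int) :
    (if c then s + 1 else s) = s + (if c then (1 : Int) else 0) := by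
  split_ifs <;> ring

lemma sweep_inv (A : List Int) (cand : Int) (hmaj : A.length < 2 * A.count cand)
    (k : Nat) (hk : k ≤ A.length) :
    (List.map (fun t : Nat => ((t : Int) + 1)) (List.range k)).foldl
        (bSweep A cand ((A.count cand : Nat) : Int)) (0, 0) =
      ((((A.take k).count cand : Nat) : Int),
        ((List.range k).map (fun t => indB A (t + 1))).sum) := by
  induction k with
  | zero => simp
  | succ k ih =>
    have hklt : k < A.length := hk
    rw [List.range_succ, List.map_append, List.foldl_append, ih (le_of_lt hklt)]
    simp only [List.map_cons, List.map_nil, List.foldl_cons, List.foldl_nil]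
    have hxa : PySem.List.pyGetD A (((k : Int) + 1) - 1) 0 = A[k] := by
      have h1 : ((k : Int) + 1) - 1 = ((k : Nat) : Int) := by ring
      rw [h1, PySem.List.pyGetD_natCast]
      exact List.getD_eq_getElem A 0 hklt
    have htake : A.take (k + 1) = A.take k ++ [A[k]] := List.take_succ_eq_append_getElem hklt
    have hleft : (if PySem.List.pyGetD A (((k : Int) + 1) - 1) 0 = cand
        then (((A.take k).count cand : Nat) : Int) + 1 else (((A.take k).count cand : Nat) : Int))
        = (((A.take (k + 1)).count cand : Nat) : Int) := by
      rw [hxa, htake, List.count_append]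
      by_cases hxc : A[k] = cand
      · rw [if_pos hxc]
        simp [hxc]
      · rw [if_neg hxc]
        simp [hxc]
    simp only [bSweep, hleft]
    have hcast : ((k : Int) + 1) = (((k + 1 : Nat)) : Int) := by push_cast; ring
    rw [hcast, ite_add_one, indB_cond (by omega : k + 1 ≤ A.length) hmaj,
      List.map_append, List.sum_append]
    simp

lemma solution_alt_eq_refB (A : List Int) : solution_alt A = refB A := by
  rcases hbm : (A.foldl bVote (none, 0)).1 with _ | cand
  · have hz : refB A = 0 := by
      refine List.sum_eq_zero (fun v hv => ?_)
      obtain ⟨t, _, rfl⟩ := List.mem_map.mp hv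
      unfold indB
      rcases hq : ldQ (A.drop (t + 1)) with _ | y
      · simp
      · rcases hq1 : ldQ (A.take (t + 1)) with _ | z
        · simp
        · by_cases hzy : z = y
          · subst hzy
            have hmaj := commonK (ldQ_eq_some_iff.mp hq1) (ldQ_eq_some_iff.mp hq)
            have := bm_majority (A := A) (x := z) (by exact_mod_cast hmaj)
            rw [this] at hbm
            cases hbm
          · simp [hzy]
    simp only [solution_alt, hbm, hz]
  · by_cases htot : ((A.count cand : Nat) : Int) * 2 ≤ (A.length : Int)
    · have hz : refB A = 0 := by
        refine List.sum_eq_zero (fun v hv => ?_)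
        obtain ⟨t, _, rfl⟩ := List.mem_map.mp hv
        unfold indB
        rcases hq : ldQ (A.drop (t + 1)) with _ | y
        · simp
        · rcases hq1 : ldQ (A.take (t + 1)) with _ | z
          · simp
          · by_cases hzy : z = y
            · subst hzy
              have hmaj := commonK (ldQ_eq_some_iff.mp hq1) (ldQ_eq_some_iff.mp hq)
              have hbm2 := bm_majority (A := A) (x := z) (by exact_mod_cast hmaj)
              rw [hbm2] at hbm
              have : z = cand := Option.some_inj.mp hbm
              subst this
              have : (A.length : Int) < 2 * ((A.count z : Nat) : Int) := by exact_mod_cast hmaj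
              omega
            · simp [hzy]
      simp only [solution_alt, hbm, hz]
      rw [if_pos htot]
    · have hmaj : A.length < 2 * A.count cand := by omega
      simp only [solution_alt, hbm]
      rw [if_neg htot, pyRange_one_up A.length,
        sweep_inv A cand hmaj (A.length - 1) (by omega)]
      rfl

lemma ldQ_drop_neg {A : List Int} {p : Nat} {y : Int} (hq : ldQ (A.drop p) = some y) :
    A.length - p < 2 * (A.drop p).count y := by
  have := ldQ_eq_some_iff.mp hq
  rwa [List.length_drop] at this

lemma ldQ_take_neg {A : List Int} {p : Nat} {y : Int} (hp : p ≤ A.length)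
    (hq : ldQ (A.take p) = some y) : p < 2 * (A.take p).count y := by
  have := ldQ_eq_some_iff.mp hq
  rwa [List.length_take_of_le hp] at this

lemma ind_eq {A : List Int} {p : Nat} (hp0 : p ≠ 0) (hpn : p < A.length)
    (hND : ¬ D_solution A) : indA A p = indB A p := by
  unfold indA indB sentVal
  rcases hq : ldQ (A.drop p) with _ | y
  · simp
  · rcases hq1 : ldQ (A.take p) with _ | z
    · by_cases hy : y = -1
      · simp [hy]
      · simp [Option.getD, hy, Ne.symm hy]
    · by_cases hy : y = -1
      · subst hy
        by_cases hz : z = -1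
        · subst hz
          exact absurd ⟨p, List.mem_range.mpr hpn, hp0,
            ldQ_take_neg (le_of_lt hpn) hq1, ldQ_drop_neg hq⟩ hND
        · simp [Option.getD, hz]
      · by_cases hzy : z = y
        · simp [Option.getD, hy, hzy]
        · simp [Option.getD, hy, hzy]

lemma indA_le_indB (A : List Int) (p : Nat) : indA A p ≤ indB A p := by
  unfold indA indB sentVal
  rcases hq : ldQ (A.drop p) with _ | y
  · simp
  · rcases hq1 : ldQ (A.take p) with _ | z
    · by_cases hy : y = -1
      · simp [hy]
      · simp [Option.getD, hy, Ne.symm hy]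
    · by_cases hzy : z = y
      · simp only [Option.getD, hzy]
        split_ifs <;> simp_all
      · by_cases hy : y = -1 <;> simp only [Option.getD, hzy, hy] <;> split_ifs <;> simp_all

theorem solution_spec : Claim_unchanged_solution := by
  intro A _ hND
  rw [solution_eq_refA, solution_alt_eq_refB]
  unfold refA refB
  refine congrArg List.sum (List.map_congr_left (fun t ht => ?_))
  have htn : t < A.length - 1 := List.mem_range.mp ht
  exact ind_eq (Nat.succ_ne_zero t) (by omega) hND

theorem solution_changed : Claim_changed_solution := by
  unfold Claim_changed_solution; decide

theorem solution_tight : Claim_exact_solution := by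
  intro A _ hD
  obtain ⟨p0, hmem, hp0, h1, h2⟩ := hD
  have hpn : p0 < A.length := List.mem_range.mp hmem
  rw [solution_eq_refA, solution_alt_eq_refB]
  unfold refA refB
  have hqd : ldQ (A.drop p0) = some (-1) := by
    apply ldQ_eq_some_iff.mpr
    rwa [List.length_drop]
  have hqt : ldQ (A.take p0) = some (-1) := by
    apply ldQ_eq_some_iff.mpr
    rwa [List.length_take_of_le (le_of_lt hpn)]
  have hstrict : indA A p0 < indB A p0 := by
    unfold indA indB sentVal
    rw [hqd, hqt]
    norm_num
  refine ne_of_lt (List.sum_lt_sum _ _ (fun t _ => indA_le_indB A (t + 1)) ?_)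
  exact ⟨p0 - 1, List.mem_range.mpr (by omega), by
    have : p0 - 1 + 1 = p0 := by omega
    rw [this]; exact hstrict⟩
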